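/- GENERATED by mk_final_copies.py from the proof of the farm's unit `start_decoder.R7c` (farm:start_decoder.R7c.1: Proof.lean) as the
   re-elaboration sweep compiled it — do not edit. -/
/-
  Unit `start_decoder.R7c`: segment R7c of `start_decoder` (0x115e8d – 0x115eee, stb_vorbis_fixed.c 4084 – 4087): the head of
  loop 4084 `for (k = classwords − 1; k ≥ 0; --k) { classdata[j][k] = temp % classifications; temp /= classifications; }`.

      walk_exit    `n = 0` (r12d = −1): `js` taken, `++j`, the head of loop 4079 (`AtR7J (j + 1)`)
      walk_round   `n ≥ 1`: one byte stored, `temp` divided, `--k`, the head of loop 4084 again (`AtR7K (n − 1)`)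

  The places, the bit-level facts and the two `idiv` (no `#DE`) are in Lemmas.lean.
-/
import Asan.CheckWalk
import Vorbis.Spec.StartDecoderBTest
import Vorbis.Spec.Units.start_decoder_R7c
import Vorbis.Spec.Worked.start_decoder_R7c_Lemmas

open X86 X86.User Asan Vorbis Vorbis.Spec Vorbis.Spec.StartDecoder

set_option maxRecDepth 4000
set_option maxHeartbeats 4000000

namespace Vorbis.Spec.start_decoder_R7c

/-- **The exit of loop 4084** (`n = 0`, r12d = −1): 0x115e8d `test r12d, r12d ; js 115eea` taken, 0x115eea `add r13d, 1 ; jmp 115db9`: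
the head of loop 4079 with `j + 1` (stb_vorbis_fixed.c:4084 left, 4079 `++j`). No store: the memory is the same, row `j` is complete
(`R7.next_rows`). -/
theorem walk_exit (Lay : Layout) (hLay : Lay.hi = 0x1000000) (μ : Microarch) (hμ : UserX.MicroOK μ) (u₀ : State)
    (hcode : HasCodeNat Lay u₀ Vorbis.L.start_decoder.entry Vorbis.Code.code_start_decoder.nat Vorbis.L.start_decoder.size)
    (g : Ghost) (i j E : Nat) (A6 A6c Ai Ak Ad Ar : Arena) (A : Arena × List Obj) (v : State)
    (hb : BodyR7K u₀ g i j E 0 A6 A6c Ai Ak Ad Ar A v) :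
    ReachVia Lay μ WayInv v (fun w => AtR7J u₀ g i (j + 1) E w) := by
  have hf := hb.loop.frame
  have he := hf.entry
  v_entry he
  simp only [depth] at he_room he_stack
  have w_rip := hf.rip
  obtain ⟨c_rsp, hR⟩ := rsp_eq hf
  have w_eq : Mem.EqOn Vorbis.L.textLo Vorbis.L.textHi u₀.mem v.mem := hf.code
  have hdf : v.flags .df = false := (show abiInv _ from hf.inv).1
  have hmx : v.mxcsr &&& 0x1F80 = 0x1F80 := (show abiInv _ from hf.inv).2
  have hsse := Vorbis.sseOK_of_abiInv hf.inv
  have c_r12 : v.reg .r12 = addr 0xFFFFFFFF := hb.r12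
  have c_r13 := hb.r13
  have c_rbp := hb.rbp
  -- 0x115e8d (loop32, C 4084) `test ; js`, 0x115eea `add r13d, 1 ; jmp 115db9`: to the head 0x115db9 (loop31, C 4079)
  u_walk hcode [hμ.vendor] until [Vorbis.L.start_decoder.loop31] span [Vorbis.L.textLo, Vorbis.L.textHi] side (v_side)
  · -- 0x115eee `jmp 115db9` done: the head of loop 4079 with `j + 1`
    have hjE := hb.j_lt
    have hElt : E < 2 ^ 31 := by
      have h1 := hb.e_eq
      have h2 := Mem.i32_range v.mem (Residue.cbk v.mem g.f (resAt g v.mem i) + Off.Codebook.entries)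
      simp only [Residue.E, Codebook.entries] at h1
      omega
    have hinv : abiInv s_115eee := by v_inv
    have hs : Mem.SameExcept [] v.mem s_115eee.mem := by
      rw [w_mem]
      exact Mem.SameExcept.refl _ _
    have hun : ShadowUntouched v.mem s_115eee.mem := by v_untouched
    have hbits : Bits (g.Blk A) g.len s_115eee.mem g.f := by
      rw [w_mem]
      exact hb.loop.mid.bits
    have hloop := hb.loop.carry hb.cur.lt hs hun (fun x hx => absurd hx (List.not_mem_nil)) hbits w_rip
      ((w_kept .rsp rfl).trans hf.rsp) w_eq hinv
    refine ReachVia.done ⟨A6, A6c, Ai, Ak, Ad, A, ?_⟩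
    exact
      { loop := hloop
        extk := hb.extk
        extd := hb.extd
        extd' := hb.extr.trans hb.extr'
        rbp := (w_kept .rbp rfl).trans hb.rbp
        rbx := by
          rw [w_mem]
          exact (w_kept .rbx rfl).trans hb.rbx
        r13 := by
          rw [w_r13]
          unfold addr
          exact cnt32_succ j (by omega)
        cnt := by
          rw [w_mem]
          exact hb.cnt
        cur := by
          rw [w_mem]
          exact hb.cur
        e_eq := by
          rw [w_mem]
          exact hb.e_eq
        j_le := hjE
        rows := by
          rw [w_mem]
          exact R7.next_rows hb rfl }
  · -- `js` not taken: impossible, r12d = −1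
    exfalso
    revert hbr_115e90
    decide

/-- **One round of loop 4084** (`n ≥ 1` bytes left, `k = n − 1`): 0x115e8d `test r12d, r12d ; js` not taken; 0x115e92 – 0x115ea6
`temp % classifications` (checked load1 of `r->classifications`, `cdq ; idiv esi`) spilled to dword `[R + 30H]`; 0x115eaa – 0x115eb4 the
checked load8 of `classdata[j]`; 0x115eb9 – 0x115ed2 the checked byte store `classdata[j][k] = dl`; 0x115ed5 – 0x115ee0
`temp /= classifications` (`idiv ecx`) into dword `[R + 18H]`; 0x115ee4 `sub r12d, 1 ; jmp 115e8d`: the head again with `n − 1`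
(stb_vorbis_fixed.c:4085 – 4086). Walked in two stages (cut at the return of the second check, 0x115eb9 = `ret431`, where the first
`idiv`'s result is named); the exit assertion is `R7.byte_step` over ONE footprint. -/
theorem walk_round (Lay : Layout) (hLay : Lay.hi = 0x1000000) (μ : Microarch) (hμ : UserX.MicroOK μ) (u₀ : State)
    (hcode : HasCodeNat Lay u₀ Vorbis.L.start_decoder.entry Vorbis.Code.code_start_decoder.nat Vorbis.L.start_decoder.size)
    (h_ld8 : Asan.SmallCheck Lay μ Vorbis.WayInv (Vorbis.CodeOK u₀) [.rax, .rcx, .rdx] 8 Vorbis.L.__asan_load8_noabort.entry)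
    (h_ld1 : Asan.SmallCheck Lay μ Vorbis.WayInv (Vorbis.CodeOK u₀) [.rax, .rdx] 1 Vorbis.L.__asan_load1_noabort.entry)
    (h_st1 : Asan.SmallCheck Lay μ Vorbis.WayInv (Vorbis.CodeOK u₀) [.rax, .rdx] 1 Vorbis.L.__asan_store1_noabort.entry)
    (g : Ghost) (i j E n : Nat) (A6 A6c Ai Ak Ad Ar : Arena) (A : Arena × List Obj) (v : State)
    (hb : BodyR7K u₀ g i j E n A6 A6c Ai Ak Ad Ar A v) (hn : 0 < n) :
    ReachVia Lay μ WayInv v (fun w => AtR7K u₀ g i j E (n - 1) w) := by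
  have hf := hb.loop.frame
  have he := hf.entry
  v_entry he
  simp only [depth] at he_room he_stack
  have w_rip := hf.rip
  obtain ⟨c_rsp, hR⟩ := rsp_eq hf
  have w_eq : Mem.EqOn Vorbis.L.textLo Vorbis.L.textHi u₀.mem v.mem := hf.code
  have hdf : v.flags .df = false := (show abiInv _ from hf.inv).1
  have hmx : v.mxcsr &&& 0x1F80 = 0x1F80 := (show abiInv _ from hf.inv).2
  have hsse := Vorbis.sseOK_of_abiInv hf.inv
  -- the places and the numbers of the round
  have hgeo := geo hb
  obtain ⟨r, hr⟩ : ∃ r, resAt g v.mem i = r := ⟨_, rfl⟩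
  rw [hr] at hgeo
  obtain ⟨cd, hcd⟩ : ∃ x, Residue.classdata v.mem r = x := ⟨_, rfl⟩
  obtain ⟨row, hrow⟩ : ∃ x, Residue.row v.mem r j = x := ⟨_, rfl⟩
  obtain ⟨W, hW⟩ : ∃ x, Residue.W v.mem g.f r = x := ⟨_, rfl⟩
  obtain ⟨cls, hcls⟩ : ∃ x, Residue.classifications v.mem r = x := ⟨_, rfl⟩
  obtain ⟨temp, htemp⟩ : ∃ x, StartDecoder.slot g v.mem 0x18 = x := ⟨_, rfl⟩
  rw [hcd, hrow, hW, hcls, htemp] at hgeo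
  obtain ⟨gcfgB, gr_lo, gr_hi, gcdB, growB, gj_lt, ge_lt, gn_le, gw_lt, gcls_pos, gcls_le, gtemp_le, gcfg_row⟩ := hgeo
  have wcfg := arena_where hb.loop gcfgB
  have wcd := arena_where hb.loop gcdB
  have wrow := arena_where hb.loop growB
  simp only [] at wcfg wcd wrow
  -- the registers
  have c_r12 : v.reg .r12 = UInt64.ofNat (n - 1) := hb.r12.trans (kword_pos n hn)
  have hmsb := k_msb (n - 1) (by omega)
  have c_r13 : v.reg .r13 = UInt64.ofNat j := hb.r13
  have c_r14 : v.reg .r14 = UInt64.ofNat (8 * j) := hb.r14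
  have c_rbp : v.reg .rbp = UInt64.ofNat g.f := hb.rbp
  have c_rbx : v.reg .rbx = UInt64.ofNat r := by
    rw [← hr]
    exact hb.rbx
  -- the loads
  have lcls : v.mem.readLE (UInt64.ofNat r + 12) 1 = cls := (load_cls v.mem r).trans hcls
  have lcd : v.mem.readLE (UInt64.ofNat r + 16) 8 = cd := (load_cd v.mem r).trans hcd
  have ltemp : v.mem.readLE (g.e.reg .rsp - 1456) 4 = temp := (load_temp g v.mem hR he_room he_top).trans htemp
  have lrow : v.mem.readLE (UInt64.ofNat (8 * j) + UInt64.ofNat cd) 8 = row := (load_row v.mem r cd j hcd).trans hrow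
  -- both `idiv` divide the same `temp` by the same `classifications`: quotient and remainder, no `#DE`
  have hdiv := idiv_nat temp cls (by omega) gcls_pos (by omega)
  -- stage 1: 0x115e8d (loop32, C 4084) … 0x115eb4, up to the return 0x115eb9 (`ret431`) of the check of the load of `classdata[j]`;
  -- `loop31` is in the list only to stop the `js`-taken arm, which is refuted below
  u_walk hcode [hμ.vendor, cnt32_sext (n - 1) (by omega), zext8 cls (by omega)] until [Vorbis.L.start_decoder.ret431, Vorbis.L.start_decoder.loop31] span [Vorbis.L.textLo, Vorbis.L.textHi] side (v_side)
  case check_115e96 =>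
    -- the load of `r->classifications`: inside record `i` of the `residue_config` block
    have hun : ShadowUntouched v.mem s_115e96.mem := by v_untouched
    refine check_blk hb.loop gcfgB hun _ (r - stb_vorbis.residue_config v.mem g.f + 12) 1 ?_ (by decide) (by simp only []; omega)
    simp only []
    u_omega
  case side_nofault =>
    -- the first `idiv`: no `#DE`
    cases hopt1.symm.trans hdiv
  case check_115eb4 =>
    -- the load of `classdata[j]`: inside the `classdata` table, `j < E`
    have hun : ShadowUntouched v.mem s_115eb4.mem := by v_untouched
    refine check_blk hb.loop gcdB hun _ (8 * j) 8 ?_ (by decide) (by simp only []; omega)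
    simp only []
    u_omega
  · -- `js` taken: impossible, `k = n − 1 ≥ 0`
    exfalso
    rw [hmsb] at hbr_115e90
    exact absurd hbr_115e90 (by decide)
  · -- 0x115eb9, after the check of the load of `classdata[j]`: the first `idiv` gave `temp / cls`, `temp % cls`
    have eqr := Option.some.inj (hopt_115ea4.symm.trans hdiv)
    subst eqr
    have hmod : temp % cls < cls := Nat.mod_lt _ (by omega)
    have edig : (BitVec.ofNat 32 (temp % cls)).toNat = temp % cls := toNat_ofNat32 _ (by omega)
    simp only [edig] at w_mem
    clear hopt_115ea4
    try clear w_zmm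
    -- stage 2: 0x115eb9 … 0x115ee8 (C 4085 – 4086, `--k`), back to the head 0x115e8d (loop32)
    u_walk hcode [hμ.vendor, cnt32_sext (n - 1) (by omega), zext8 cls (by omega), Mem.readLE1_of_writeLE4] until [Vorbis.L.start_decoder.loop32] span [Vorbis.L.textLo, Vorbis.L.textHi] side (v_side)
    case check_115ec8 =>
      -- the store of `classdata[j][k]`: inside row `j`, `k = n − 1 < W`
      have hun : ShadowUntouched v.mem s_115ec8.mem := by v_untouched
      refine check_blk hb.loop growB hun _ (n - 1) 1 ?_ (by decide) (by simp only []; omega)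
      simp only []
      u_omega
    case side_nofault =>
      -- the second `idiv`: no `#DE`
      cases hopt1.symm.trans hdiv
    -- 0x115ee8 `jmp 115e8d` done: the head of loop 4084 with `n − 1`
    have eqr := Option.some.inj (hopt_115ede.symm.trans hdiv)
    subst eqr
    have hquo : temp / cls ≤ temp := Nat.div_le_self _ _
    have equo : (BitVec.ofNat 32 (temp / cls)).toNat = temp / cls := toNat_ofNat32 _ (by omega)
    have ebyte := byte_of_digit (temp % cls) (by omega)
    simp only [equo, ebyte] at w_mem
    have eb : (UInt64.ofNat (n - 1) + UInt64.ofNat row).toNat = row + (n - 1) := by u_omega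
    have hs : Mem.SameExcept
        [⟨(g.e.reg .rsp).toNat - 1888, (g.e.reg .rsp).toNat - 1480⟩,
         ⟨(g.e.reg .rsp).toNat - 1432, (g.e.reg .rsp).toNat - 1428⟩,
         ⟨(g.e.reg .rsp).toNat - 1456, (g.e.reg .rsp).toNat - 1452⟩,
         ⟨row + (n - 1), row + n⟩] v.mem s_115ee8.mem := by
      u_same
    have hun : ShadowUntouched v.mem s_115ee8.mem := by v_untouched
    have hinv : abiInv s_115ee8 := by v_inv
    have hp : Pos g A := Pos.of_mid hb.loop.frame hb.loop.hand hb.loop.mid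
    have hbits : Bits (g.Blk A) g.len s_115ee8.mem g.f := by
      apply bits_kept hp hb.loop.mid.bits hs
      intro w hw
      simp only [List.mem_cons, List.mem_nil_iff, or_false] at hw
      rcases hw with rfl | rfl | rfl | rfl
      · left
        simp only []
        omega
      · left
        simp only []
        omega
      · left
        simp only []
        omega
      · right
        left
        simp only []
        omega
    have hdig : s_115ee8.mem.readLE (UInt64.ofNat (n - 1) + UInt64.ofNat row) 1 = temp % cls := by
      rw [w_mem]
      u_read
    have hquot : s_115ee8.mem.readLE (g.e.reg .rsp - 1456) 4 = temp / cls := by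
      rw [w_mem]
      u_read
    have hbody := R7.byte_step (w := s_115ee8) hb hn hs hun ?hok ?hbyte ?htemp hbits w_rip (w_rsp.trans (c_rsp.symm.trans hf.rsp)) w_eq hinv
      (w_kept .rbp rfl) (w_kept .rbx rfl) (w_kept .r13 rfl) (w_kept .r14 rfl) (w_r12.trans (kword_pred n hn (by omega)))
    case hok =>
      intro x hx
      simp only [List.mem_cons, List.mem_nil_iff, or_false] at hx
      rw [hr, hrow]
      rcases hx with rfl | rfl | rfl | rfl
      · left
        simp only []
        omega
      · right
        left
        simp only []
        omega
      · right
        right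
        left
        simp only []
        omega
      · right
        right
        right
        exact ⟨rfl, rfl⟩
    case hbyte =>
      rw [hr, hrow, hcls]
      unfold Mem.u8
      rw [← byte_addr (n - 1) row, hdig]
      exact hmod
    case htemp =>
      rw [htemp]
      unfold StartDecoder.slot Mem.u32
      rw [← slot18_addr g hR he_room he_top, hquot]
      exact hquo
    exact ReachVia.done ⟨A6, A6c, Ai, Ak, Ad, Ar, A, hbody⟩


end Vorbis.Spec.start_decoder_R7c

/-- **Segment R7c of `start_decoder`** (0x115e8d → 0x115db9 ∨ 0x115e8d): by cases on the number `n` of bytes of row `j` still to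
store: none (`walk_exit`), or one round (`walk_round`). -/
theorem Vorbis.Spec.Worked.start_decoder_R7c_ok : Vorbis.Spec.start_decoder_R7c.Statement := by
  unfold Vorbis.Spec.start_decoder_R7c.Statement
  intro Lay hLay μ hμ u₀ hcode h_ld8 h_ld1 h_st1
  intro g i j E n v hat
  obtain ⟨A6, A6c, Ai, Ak, Ad, Ar, A, hb⟩ := hat
  by_cases hn : n = 0
  · -- the row is complete
    subst hn
    refine (Vorbis.Spec.start_decoder_R7c.walk_exit Lay hLay μ hμ u₀ hcode g i j E A6 A6c Ai Ak Ad Ar A v hb).mono ?_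
    intro w hw
    exact Or.inl hw
  · -- one more byte
    have hpos : 0 < n := by omega
    refine (Vorbis.Spec.start_decoder_R7c.walk_round Lay hLay μ hμ u₀ hcode h_ld8 h_ld1 h_st1 g i j E n A6 A6c Ai Ak Ad Ar A v
      hb hpos).mono ?_
    intro w hw
    exact Or.inr ⟨hpos, hw⟩
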